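-- pv_equiv track=rewrite | github.com/tdw419/the-game-to-help-our-world | truth_management_system/backend/simulator/unified_abstraction.py | _classify_simulator_type
-- ===== SOURCE A (Python) =====
-- def _classify_simulator_type(description: str) -> str:
--     """Classify simulator type from description"""
--     desc_lower = description.lower()
--
--     if any(word in desc_lower for word in ["evolve", "improve", "optimize"]):
--         return "idea_evolution"
--     elif any(word in desc_lower for word in ["cluster", "group", "organize"]):
--         return "concept_clustering"
--     elif any(word in desc_lower for word in ["research", "explore", "discover"]):
--         return "research_exploration"
--     elif any(word in desc_lower for word in ["algorithm", "design", "create"]):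
--         return "algorithm_design"
--     elif any(word in desc_lower for word in ["synthesize", "combine", "integrate"]):
--         return "knowledge_synthesis"
--     else:
--         return "idea_evolution" # Default
-- ===== SOURCE B (Python) =====
-- _KEYWORD_GROUP = {
--     "evolve": 0, "improve": 0, "optimize": 0,
--     "cluster": 1, "group": 1, "organize": 1,
--     "research": 2, "explore": 2, "discover": 2,
--     "algorithm": 3, "design": 3, "create": 3,
--     "synthesize": 4, "combine": 4, "integrate": 4,
-- }
--
-- _LABELS = ["idea_evolution", "concept_clustering", "research_exploration",
--            "algorithm_design", "knowledge_synthesis"]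
--
--
-- def _classify_simulator_type(description: str) -> str:
--     """Classify by the highest-priority (lowest group index) keyword present.
--
--     Instead of testing keyword groups one by one with early return, scan the
--     flat keyword->group map once and aggregate the minimum group index of any
--     keyword found; the answer is that group's label (default: idea_evolution).
--     """
--     desc = description.lower()
--     best = None
--     for word, g in _KEYWORD_GROUP.items():
--         if word in desc and (best is None or g < best):
--             best = g
--     return _LABELS[best] if best is not None else "idea_evolution"
-- ===== Notes on version B (the rewrite author's own statement) =====
-- stated objective: alternative
-- what changed: Replaces the ordered if/elif group-by-group early-return chain with a single aggregation pass over a flat keyword-to-group-index map that computes the minimum matched group index, then indexes a label table (default when no keyword matches).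
import Mathlib
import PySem

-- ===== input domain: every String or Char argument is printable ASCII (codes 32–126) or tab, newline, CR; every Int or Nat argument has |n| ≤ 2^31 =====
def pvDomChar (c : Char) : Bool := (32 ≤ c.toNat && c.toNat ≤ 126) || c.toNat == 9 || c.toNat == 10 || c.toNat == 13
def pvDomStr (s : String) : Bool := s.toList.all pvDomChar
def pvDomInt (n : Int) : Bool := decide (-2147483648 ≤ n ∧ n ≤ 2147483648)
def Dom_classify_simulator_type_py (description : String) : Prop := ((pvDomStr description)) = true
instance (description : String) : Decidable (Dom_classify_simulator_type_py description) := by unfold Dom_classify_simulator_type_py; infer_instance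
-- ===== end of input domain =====

-- B replaces A's ordered early-return group chain by an aggregation pass: minimum matched
-- group index over a flat keyword->group map, then a label-table lookup; objective: alternative.

-- ===== PORT A =====
def classify_simulator_type_py (description : String) : String :=
  let desc_lower := PySem.Str.lower description
  if (["evolve", "improve", "optimize"] : List String).any (fun word => PySem.Str.isIn word desc_lower) then
    "idea_evolution"
  else if (["cluster", "group", "organize"] : List String).any (fun word => PySem.Str.isIn word desc_lower) then
    "concept_clustering"
  else if (["research", "explore", "discover"] : List String).any (fun word => PySem.Str.isIn word desc_lower) then
    "research_exploration"
  else if (["algorithm", "design", "create"] : List String).any (fun word => PySem.Str.isIn word desc_lower) then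
    "algorithm_design"
  else if (["synthesize", "combine", "integrate"] : List String).any (fun word => PySem.Str.isIn word desc_lower) then
    "knowledge_synthesis"
  else
    "idea_evolution"

-- ===== PORT B =====
def pvKeywordGroup : List (String × Nat) :=
  [("evolve", 0), ("improve", 0), ("optimize", 0),
   ("cluster", 1), ("group", 1), ("organize", 1),
   ("research", 2), ("explore", 2), ("discover", 2),
   ("algorithm", 3), ("design", 3), ("create", 3),
   ("synthesize", 4), ("combine", 4), ("integrate", 4)]

def pvLabels : List String :=
  ["idea_evolution", "concept_clustering", "research_exploration",
   "algorithm_design", "knowledge_synthesis"]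

def classify_simulator_type_py_alt (description : String) : String :=
  let desc := PySem.Str.lower description
  let best : Option Nat :=
    pvKeywordGroup.foldl
      (fun best wg =>
        if PySem.Str.isIn wg.1 desc && (best.isNone || decide (wg.2 < best.getD 0)) then
          some wg.2
        else best)
      none
  match best with
  | some g => pvLabels.getD g "idea_evolution"
  | none => "idea_evolution"

-- ===== PRECONDITION & SPEC =====
def Spec_classify_simulator_type_py (description : String) (out : String) : Prop := out = classify_simulator_type_py_alt description
instance (description : String) (out : String) : Decidable (Spec_classify_simulator_type_py description out) := by unfold Spec_classify_simulator_type_py; infer_instance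

-- ===== CLAIM (what is proved, stated in full; the proofs are below) =====
def Claim_equal_classify_simulator_type_py : Prop := ∀ (description : String), Dom_classify_simulator_type_py description → Spec_classify_simulator_type_py description (classify_simulator_type_py description)

-- ===== LEMMAS AND PROOFS =====

-- Option-valued minimum (none = "no match yet").
def pvOMin : Option Nat → Option Nat → Option Nat
  | none, b => b
  | some a, none => some a
  | some a, some b => some (min a b)

-- Minimum group index among the keywords of l that occur in desc.
def pvMinM (desc : String) (l : List (String × Nat)) : Option Nat :=
  l.foldr (fun wg r => if PySem.Str.isIn wg.1 desc then pvOMin (some wg.2) r else r) none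

theorem pvOMin_assoc (a b c : Option Nat) :
    pvOMin (pvOMin a b) c = pvOMin a (pvOMin b c) := by
  cases a <;> cases b <;> cases c <;> simp [pvOMin, Nat.min_assoc]

theorem pvFold_eq (desc : String) (l : List (String × Nat)) (acc : Option Nat) :
    l.foldl
      (fun best wg =>
        if PySem.Str.isIn wg.1 desc && (best.isNone || decide (wg.2 < best.getD 0)) then
          some wg.2
        else best)
      acc = pvOMin acc (pvMinM desc l) := by
  induction l generalizing acc with
  | nil => cases acc <;> rfl
  | cons hd t ih =>
    have hstep :
        (if PySem.Str.isIn hd.1 desc && (acc.isNone || decide (hd.2 < acc.getD 0)) then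
          some hd.2
        else acc) = if PySem.Str.isIn hd.1 desc then pvOMin acc (some hd.2) else acc := by
      cases h : PySem.Str.isIn hd.1 desc <;> cases acc <;>
        simp_all [pvOMin, Nat.min_def]; split_ifs <;> first | rfl | omega
    rw [List.foldl_cons, ih, hstep]
    show _ = pvOMin acc (pvMinM desc (hd :: t))
    unfold pvMinM
    rw [List.foldr_cons]
    cases h : PySem.Str.isIn hd.1 desc
    · simp
    · simp only [ite_true]
      exact pvOMin_assoc acc (some hd.2) _


theorem pvMinM_append (desc : String) (l1 l2 : List (String × Nat)) :
    pvMinM desc (l1 ++ l2) = pvOMin (pvMinM desc l1) (pvMinM desc l2) := by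
  induction l1 with
  | nil => simp [pvMinM, pvOMin]
  | cons hd t ih =>
    unfold pvMinM at *
    rw [List.cons_append, List.foldr_cons, List.foldr_cons, ih]
    cases h : PySem.Str.isIn hd.1 desc
    · simp
    · simp only [ite_true]
      exact (pvOMin_assoc (some hd.2) _ _).symm

theorem pvMinM_group (desc : String) (w1 w2 w3 : String) (i : Nat) :
    pvMinM desc [(w1, i), (w2, i), (w3, i)] =
      if PySem.Str.isIn w1 desc || PySem.Str.isIn w2 desc || PySem.Str.isIn w3 desc then
        some i
      else none := by
  unfold pvMinM
  cases h1 : PySem.Str.isIn w1 desc <;> cases h2 : PySem.Str.isIn w2 desc <;>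
    cases h3 : PySem.Str.isIn w3 desc <;> simp_all [pvOMin]

theorem pv_eq (description : String) :
    classify_simulator_type_py description = classify_simulator_type_py_alt description := by
  unfold classify_simulator_type_py classify_simulator_type_py_alt
  have hsplit : pvKeywordGroup =
      [("evolve", 0), ("improve", 0), ("optimize", 0)] ++
      ([("cluster", 1), ("group", 1), ("organize", 1)] ++
       ([("research", 2), ("explore", 2), ("discover", 2)] ++
        ([("algorithm", 3), ("design", 3), ("create", 3)] ++
         [("synthesize", 4), ("combine", 4), ("integrate", 4)]))) := rfl
  rw [hsplit]
  simp only [pvFold_eq, pvMinM_append, pvMinM_group]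
  simp only [List.any_cons, List.any_nil, Bool.or_false, Bool.or_assoc]
  cases h1 : (PySem.Str.isIn "evolve" (PySem.Str.lower description) ||
      (PySem.Str.isIn "improve" (PySem.Str.lower description) ||
       PySem.Str.isIn "optimize" (PySem.Str.lower description))) <;>
  cases h2 : (PySem.Str.isIn "cluster" (PySem.Str.lower description) ||
      (PySem.Str.isIn "group" (PySem.Str.lower description) ||
       PySem.Str.isIn "organize" (PySem.Str.lower description))) <;>
  cases h3 : (PySem.Str.isIn "research" (PySem.Str.lower description) ||
      (PySem.Str.isIn "explore" (PySem.Str.lower description) ||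
       PySem.Str.isIn "discover" (PySem.Str.lower description))) <;>
  cases h4 : (PySem.Str.isIn "algorithm" (PySem.Str.lower description) ||
      (PySem.Str.isIn "design" (PySem.Str.lower description) ||
       PySem.Str.isIn "create" (PySem.Str.lower description))) <;>
  cases h5 : (PySem.Str.isIn "synthesize" (PySem.Str.lower description) ||
      (PySem.Str.isIn "combine" (PySem.Str.lower description) ||
       PySem.Str.isIn "integrate" (PySem.Str.lower description))) <;>
  simp_all [pvOMin, pvLabels]

-- ===== VERDICT (by name: the statement is the Claim_ definition above) =====
theorem classify_simulator_type_py_spec : Claim_equal_classify_simulator_type_py := by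
  intro description _
  unfold Spec_classify_simulator_type_py
  exact pv_eq description
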